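-- pv_equiv track=rewrite | github.com/myszpolna/genus | genus/ProteinAnalysis.py | __multiplicity
-- ===== SOURCE A (Python) =====
-- def __multiplicity(tab, minimum, maximum):
--     u'''compute biffurcation numbers'''
--     b1_b2_list = []
--     for i in range(minimum, maximum + 1):
--         b1 = 0
--         b2 = 0
--         for j in range(len(tab)):
--             if tab[j][0] == i or tab[j][1] == i:
--                 if tab[j][1] < i:
--                     b1 += 1
--                 elif tab[j][0] < i:
--                     b1 += 1
--                 else:
--                     b2 += 1
--         b1_b2_list.append(b1 + b2)
--     return b1_b2_list
-- ===== SOURCE B (Python) =====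
-- def __multiplicity(tab, minimum, maximum):
--     u'''compute biffurcation numbers'''
--     freq = {}
--     for a, b in tab:
--         freq[a] = freq.get(a, 0) + 1
--         if b != a:
--             freq[b] = freq.get(b, 0) + 1
--     return [freq.get(i, 0) for i in range(minimum, maximum + 1)]
-- ===== Notes on version B (the rewrite author's own statement) =====
-- stated objective: faster
-- what changed: Replaces the per-value rescans of tab (one full pass for every i in [minimum, maximum]) by a single-pass endpoint frequency dictionary followed by one O(1) lookup per i.
import Mathlib
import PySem

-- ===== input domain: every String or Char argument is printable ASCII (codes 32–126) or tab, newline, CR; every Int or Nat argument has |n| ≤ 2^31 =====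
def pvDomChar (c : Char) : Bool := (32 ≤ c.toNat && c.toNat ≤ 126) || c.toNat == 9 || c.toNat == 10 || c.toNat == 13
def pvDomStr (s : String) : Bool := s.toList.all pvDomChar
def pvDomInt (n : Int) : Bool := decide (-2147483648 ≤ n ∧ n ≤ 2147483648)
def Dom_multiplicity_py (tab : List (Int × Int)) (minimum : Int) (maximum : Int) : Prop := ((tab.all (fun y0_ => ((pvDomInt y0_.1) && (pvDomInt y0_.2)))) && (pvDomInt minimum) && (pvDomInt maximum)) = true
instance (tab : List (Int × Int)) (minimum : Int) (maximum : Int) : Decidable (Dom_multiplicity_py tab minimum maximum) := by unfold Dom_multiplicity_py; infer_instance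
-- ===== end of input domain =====

-- B replaces A's per-value rescan of tab by one frequency-dict pass plus a lookup per i (faster, asymptotic).

-- ===== PORT A =====
-- literal port of A: outer loop over range(minimum, maximum+1), inner loop over j in range(len(tab))
def multiplicity_py (tab : List (Int × Int)) (minimum : Int) (maximum : Int) : List Int :=
  (PySem.List.pyRange minimum (maximum + 1) 1).foldl (fun b1_b2_list i =>
    let bb : Int × Int :=
      (PySem.List.pyRange 0 (tab.length : Int) 1).foldl (fun (bb : Int × Int) j =>
        let row := PySem.List.pyGetD tab j (0, 0)   -- j always in range: pyGetD = tab[j]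
        if row.1 == i || row.2 == i then
          if row.2 < i then (bb.1 + 1, bb.2)
          else if row.1 < i then (bb.1 + 1, bb.2)
          else (bb.1, bb.2 + 1)
        else bb) (0, 0)
    b1_b2_list ++ [bb.1 + bb.2]) []

-- ===== PORT B =====
-- B-side helper: the endpoint-frequency dict, built in one pass over tab
def pvFreq (tab : List (Int × Int)) : PySem.Dict Int Int :=
  tab.foldl (fun d p =>
    let d1 := d.insert p.1 (d.getD p.1 0 + 1)
    if p.2 ≠ p.1 then d1.insert p.2 (d1.getD p.2 0 + 1) else d1) PySem.Dict.empty

def multiplicity_py_alt (tab : List (Int × Int)) (minimum : Int) (maximum : Int) : List Int :=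
  (PySem.List.pyRange minimum (maximum + 1) 1).map (fun i => (pvFreq tab).getD i 0)

-- ===== PRECONDITION & SPEC =====
def Spec_multiplicity_py (tab : List (Int × Int)) (minimum : Int) (maximum : Int) (out : List Int) : Prop := out = multiplicity_py_alt tab minimum maximum
instance (tab : List (Int × Int)) (minimum : Int) (maximum : Int) (out : List Int) : Decidable (Spec_multiplicity_py tab minimum maximum out) := by unfold Spec_multiplicity_py; infer_instance

-- ===== CLAIM (what is proved, stated in full; the proofs are below) =====
def Claim_equal_multiplicity_py : Prop := ∀ (tab : List (Int × Int)) (minimum : Int) (maximum : Int), Dom_multiplicity_py tab minimum maximum → Spec_multiplicity_py tab minimum maximum (multiplicity_py tab minimum maximum)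

-- ===== LEMMAS AND PROOFS =====

-- the row predicate: row has i as an endpoint
def pvHit (i : Int) (p : Int × Int) : Bool := p.1 == i || p.2 == i

-- A's inner loop keeps the invariant b1 + b2 = start + (#rows hit so far)
lemma pvA_inner (i : Int) (tab : List (Int × Int)) (bb : Int × Int) :
    (tab.foldl (fun (bb : Int × Int) row =>
        if row.1 == i || row.2 == i then
          if row.2 < i then (bb.1 + 1, bb.2)
          else if row.1 < i then (bb.1 + 1, bb.2)
          else (bb.1, bb.2 + 1)
        else bb) bb).1 +
    (tab.foldl (fun (bb : Int × Int) row =>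
        if row.1 == i || row.2 == i then
          if row.2 < i then (bb.1 + 1, bb.2)
          else if row.1 < i then (bb.1 + 1, bb.2)
          else (bb.1, bb.2 + 1)
        else bb) bb).2 = bb.1 + bb.2 + (tab.countP (pvHit i) : Int) := by
  induction tab generalizing bb with
  | nil => simp
  | cons p rest ih =>
    simp only [List.foldl_cons, List.countP_cons, pvHit]
    rw [ih]
    split_ifs <;> simp_all <;> omega

-- B's dict: the frequency of i after processing tab on top of d
lemma pvFreq_getD (i : Int) (tab : List (Int × Int)) (d : PySem.Dict Int Int) :
    (tab.foldl (fun d p =>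
      let d1 := d.insert p.1 (d.getD p.1 0 + 1)
      if p.2 ≠ p.1 then d1.insert p.2 (d1.getD p.2 0 + 1) else d1) d).getD i 0
    = d.getD i 0 + (tab.countP (pvHit i) : Int) := by
  induction tab generalizing d with
  | nil => simp
  | cons p rest ih =>
    simp only [List.foldl_cons, List.countP_cons]
    rw [ih]
    have key : ((if p.2 ≠ p.1 then
        ((d.insert p.1 (d.getD p.1 0 + 1)).insert p.2
          ((d.insert p.1 (d.getD p.1 0 + 1)).getD p.2 0 + 1))
        else d.insert p.1 (d.getD p.1 0 + 1)) : PySem.Dict Int Int).getD i 0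
        = d.getD i 0 + (if pvHit i p then 1 else 0) := by
      simp only [pvHit, PySem.Dict.getD_insert]
      simp only [ne_eq, Bool.or_eq_true, beq_iff_eq]
      split_ifs <;> subst_vars <;> simp_all [PySem.Dict.getD_insert] <;>
        first
        | omega
        | (split_ifs <;> simp_all <;> omega)
    rw [key]
    by_cases h : pvHit i p = true <;> simp [h] <;> push_cast <;> ring

-- folding with append builds the map
lemma pvFoldl_append_map {α β : Type} (l : List α) (g : α → β) (acc : List β) :
    l.foldl (fun acc i => acc ++ [g i]) acc = acc ++ l.map g := by
  induction l generalizing acc with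
  | nil => simp
  | cons x xs ih => simp [ih]

-- ===== VERDICT (by name: the statement is the Claim_ definition above) =====
theorem multiplicity_py_spec : Claim_equal_multiplicity_py := by
  intro tab minimum maximum _
  unfold Spec_multiplicity_py multiplicity_py multiplicity_py_alt
  rw [pvFoldl_append_map]
  simp only [List.nil_append]
  apply List.map_congr_left
  intro i _
  rw [PySem.List.foldl_pyRange_zero_pyGetD' tab (0,0)
        (fun (bb : Int × Int) row =>
          if row.1 == i || row.2 == i then
            if row.2 < i then (bb.1 + 1, bb.2)
            else if row.1 < i then (bb.1 + 1, bb.2)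
            else (bb.1, bb.2 + 1)
          else bb) (0,0)]
  rw [pvA_inner]
  unfold pvFreq
  rw [pvFreq_getD]
  simp
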